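-- pv_equiv track=rewrite | github.com/bagmk/storyworld-simulator | tools/character_coherence_benchmark.py | count_character_mentions
-- ===== SOURCE A (Python) =====
-- def count_character_mentions(text: str, char_index: dict[str, set[str]]) -> dict[str, int]:
--     low = text.lower()
--     counts: dict[str, int] = {}
--     for cid, aliases in char_index.items():
--         n = 0
--         for alias in aliases:
--             if not alias:
--                 continue
--             n += low.count(alias)
--         if n > 0:
--             counts[cid] = n
--     return counts
-- ===== SOURCE B (Python) =====
-- def count_character_mentions(text: str, char_index: dict[str, set[str]]) -> dict[str, int]:
--     low = text.lower()
--     # One pattern state per (character, non-empty alias): [alias, next allowed start, count].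
--     # A single left-to-right scan over the text advances every pattern at once; the
--     # "next allowed start" field realises str.count's greedy non-overlapping rule.
--     states = [[[a, 0, 0] for a in aliases if a] for aliases in char_index.values()]
--     for i in range(len(low)):
--         for group in states:
--             for st in group:
--                 if i >= st[1] and low.startswith(st[0], i):
--                     st[1] = i + len(st[0])
--                     st[2] += 1
--     counts: dict[str, int] = {}
--     for cid, group in zip(char_index, states):
--         n = sum(st[2] for st in group)
--         if n > 0:
--             counts[cid] = n
--     return counts
-- ===== Notes on version B (the rewrite author's own statement) =====
-- stated objective: alternative
-- what changed: B is a position-major multi-pattern matcher: it scans the text once, left to right, keeping for every (character, alias) pattern a 'next allowed start' cursor and a hit counter (greedy non-overlapping matching), then aggregates the per-pattern counters per character; A instead runs str.count over the whole text separately for each alias.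
import Mathlib
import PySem

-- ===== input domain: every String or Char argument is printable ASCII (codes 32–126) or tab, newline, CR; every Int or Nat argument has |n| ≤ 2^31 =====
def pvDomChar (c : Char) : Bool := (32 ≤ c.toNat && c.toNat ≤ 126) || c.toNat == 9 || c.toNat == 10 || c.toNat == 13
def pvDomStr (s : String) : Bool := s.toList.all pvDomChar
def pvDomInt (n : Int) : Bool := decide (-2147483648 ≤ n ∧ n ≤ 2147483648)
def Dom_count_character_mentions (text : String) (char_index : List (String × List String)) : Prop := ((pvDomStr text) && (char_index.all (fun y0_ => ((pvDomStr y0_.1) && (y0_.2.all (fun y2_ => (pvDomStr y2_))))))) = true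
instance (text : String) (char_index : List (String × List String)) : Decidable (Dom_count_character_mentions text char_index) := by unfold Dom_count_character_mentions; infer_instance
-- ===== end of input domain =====

-- B replaces A's per-alias str.count passes by a single left-to-right position scan of the
-- text that advances one greedy non-overlapping matcher state (next allowed start + counter)
-- per (character, alias) pattern at once, then aggregates per character; objective:
-- alternative (same cost, different algorithm).

-- ===== PORT A =====
def count_character_mentions (text : String) (char_index : List (String × List String)) : List (String × Int) :=
  let low := PySem.Str.lower text
  let counts : PySem.Dict String Int :=
    char_index.foldl (fun counts p =>
      let n : Int := p.2.foldl (fun n al =>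
        if al = "" then n else n + (PySem.Str.count low al : Int)) 0
      if n > 0 then counts.insert p.1 n else counts) PySem.Dict.empty
  counts.items

-- ===== PORT B =====
-- one pattern state (alias, next allowed start, count) advanced at text position i
def bstep (low : List Char) (i : Nat) (st : List Char × Nat × Nat) : List Char × Nat × Nat :=
  if st.2.1 ≤ i ∧ PySem.Chars.startswith (List.drop i low) st.1 = true then
    (st.1, i + st.1.length, st.2.2 + 1)
  else st

def count_character_mentions_alt (text : String) (char_index : List (String × List String)) : List (String × Int) :=
  let low := (PySem.Str.lower text).toList
  let states0 : List (List (List Char × Nat × Nat)) :=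
    char_index.map (fun p => (p.2.filter (fun a => a ≠ "")).map (fun a => (a.toList, 0, 0)))
  let states := (List.range low.length).foldl
    (fun sts i => sts.map (fun g => g.map (fun st => bstep low i st))) states0
  let counts := (char_index.zip states).foldl
    (fun d q =>
      let n : Int := (q.2.map (fun st => ((st.2.2 : Int)))).sum
      if n > 0 then d.insert q.1.1 n else d) PySem.Dict.empty
  counts.items

-- ===== PRECONDITION & SPEC =====
def Spec_count_character_mentions (text : String) (char_index : List (String × List String)) (out : List (String × Int)) : Prop := out = count_character_mentions_alt text char_index
instance (text : String) (char_index : List (String × List String)) (out : List (String × Int)) : Decidable (Spec_count_character_mentions text char_index out) := by unfold Spec_count_character_mentions; infer_instance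

-- ===== CLAIM (what is proved, stated in full; the proofs are below) =====
def Claim_equal_count_character_mentions : Prop := ∀ (text : String) (char_index : List (String × List String)), Dom_count_character_mentions text char_index → Spec_count_character_mentions text char_index (count_character_mentions text char_index)

-- ===== LEMMAS AND PROOFS =====

theorem countGo_nil (sub : List Char) (f : Nat) (acc : Nat) :
    PySem.Chars.count.go sub f [] acc = acc := by
  cases f <;> simp [PySem.Chars.count.go]

theorem countGo_acc (sub : List Char) (f : Nat) (l : List Char) (acc : Nat) :
    PySem.Chars.count.go sub f l acc = acc + PySem.Chars.count.go sub f l 0 := by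
  induction f generalizing l acc with
  | zero => simp [PySem.Chars.count.go]
  | succ f ih =>
    cases l with
    | nil => simp [countGo_nil]
    | cons c t =>
      simp only [PySem.Chars.count.go]
      split
      · rw [ih _ (acc+1), ih _ (0+1)]; omega
      · exact ih t acc

theorem countGo_fuel (sub : List Char) (hsub : sub ≠ []) :
    ∀ (f1 f2 : Nat) (l : List Char) (acc : Nat),
    l.length ≤ f1 → l.length ≤ f2 →
    PySem.Chars.count.go sub f1 l acc = PySem.Chars.count.go sub f2 l acc := by
  intro f1
  induction f1 with
  | zero =>
    intro f2 l acc h1 h2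
    have : l = [] := by cases l <;> simp_all
    subst this
    simp [PySem.Chars.count.go, countGo_nil]
  | succ f1 ih =>
    intro f2 l acc h1 h2
    cases l with
    | nil => simp [countGo_nil]
    | cons c t =>
      cases f2 with
      | zero => simp at h2
      | succ f2 =>
        have hsl : 1 ≤ sub.length := by cases sub with
          | nil => exact absurd rfl hsub
          | cons a b => simp
        simp only [PySem.Chars.count.go]
        split
        · rename_i hpre
          have hlen : sub.length ≤ (c :: t).length :=
            List.IsPrefix.length_le (List.isPrefixOf_iff_prefix.mp hpre)
          apply ih
          · simp at h1 hlen ⊢; omega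
          · simp at h2 hlen ⊢; omega
        · apply ih
          · simp at h1 ⊢; omega
          · simp at h2 ⊢; omega

theorem count_nil (a : List Char) (ha : a ≠ []) : PySem.Chars.count [] a = 0 := by
  simp [PySem.Chars.count, List.isEmpty_iff, ha, PySem.Chars.count.go]

theorem count_go_eq (s a : List Char) (ha : a ≠ []) :
    PySem.Chars.count s a = PySem.Chars.count.go a s.length s 0 := by
  have hne : a.isEmpty = false := by
    cases a with
    | nil => exact absurd rfl ha
    | cons x y => rfl
  simp [PySem.Chars.count, hne]

theorem count_cons (a : List Char) (ha : a ≠ []) (c : Char) (t : List Char) :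
    PySem.Chars.count (c :: t) a =
      if a.isPrefixOf (c :: t) = true then
        PySem.Chars.count (List.drop a.length (c :: t)) a + 1
      else PySem.Chars.count t a := by
  have hsl : 1 ≤ a.length := by cases a with
    | nil => exact absurd rfl ha
    | cons x y => simp
  rw [count_go_eq (c :: t) a ha, count_go_eq (List.drop a.length (c :: t)) a ha,
    count_go_eq t a ha]
  simp only [List.length_cons, PySem.Chars.count.go]
  split
  · rename_i hpre
    have hlen : a.length ≤ (c :: t).length :=
      List.IsPrefix.length_le (List.isPrefixOf_iff_prefix.mp hpre)
    rw [countGo_acc]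
    rw [countGo_fuel a ha t.length (List.drop a.length (c :: t)).length
        (List.drop a.length (c :: t)) 0 (by simp at hlen ⊢; omega) le_rfl]
    omega
  · rfl

-- the per-pattern position scan computes Python's greedy non-overlapping count
theorem scan_count (low a : List Char) (ha : a ≠ []) :
    ∀ (m k nk cnt : Nat), k + m = low.length →
    ((List.range' k m).foldl (fun st i => bstep low i st) (a, nk, cnt)).2.2
      = cnt + PySem.Chars.count (List.drop (max k nk) low) a := by
  intro m
  induction m with
  | zero =>
    intro k nk cnt hk
    have hd : List.drop (max k nk) low = [] := List.drop_eq_nil_of_le (by omega)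
    simp [hd, count_nil a ha]
  | succ m ih =>
    intro k nk cnt hk
    have hklt : k < low.length := by omega
    have hdrop := List.drop_eq_getElem_cons hklt
    rw [List.range'_succ, List.foldl_cons]
    by_cases hnk : nk ≤ k
    · by_cases hpre : a.isPrefixOf (List.drop k low) = true
      · have hb : bstep low k (a, nk, cnt) = (a, k + a.length, cnt + 1) := by
          simp [bstep, hnk, PySem.Chars.startswith, hpre]
        have hsl : 1 ≤ a.length := by cases a with
          | nil => exact absurd rfl ha
          | cons x y => simp
        rw [hb, ih (k+1) (k + a.length) (cnt+1) (by omega)]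
        have hm1 : max k nk = k := by omega
        have hm2 : max (k+1) (k + a.length) = k + a.length := by omega
        rw [hm1, hm2, hdrop, count_cons a ha, if_pos (hdrop ▸ hpre)]
        have hdd : List.drop a.length (low[k] :: List.drop (k+1) low)
            = List.drop (k + a.length) low := by
          rw [← hdrop, List.drop_drop, Nat.add_comm]
        rw [hdd]
        omega
      · have hb : bstep low k (a, nk, cnt) = (a, nk, cnt) := by
          simp [bstep, PySem.Chars.startswith, hpre]
        rw [hb, ih (k+1) nk cnt (by omega)]
        have hm1 : max k nk = k := by omega
        have hm2 : max (k+1) nk = k + 1 := by omega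
        rw [hm1, hm2, hdrop, count_cons a ha, if_neg (by rw [← hdrop]; exact hpre)]
    · have hb : bstep low k (a, nk, cnt) = (a, nk, cnt) := by
        simp [bstep]
        omega
      rw [hb, ih (k+1) nk cnt (by omega)]
      have hm : max (k+1) nk = max k nk := by omega
      rw [hm]

-- a fold that maps every element at each step is the map of the per-element folds
theorem foldl_map_comm {α β : Type} (f : β → α → α) :
    ∀ (idxs : List β) (l : List α),
    idxs.foldl (fun xs i => xs.map (f i)) l = l.map (fun x => idxs.foldl (fun x i => f i x) x) := by
  intro idxs
  induction idxs with
  | nil => intro l; simp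
  | cons i is ih =>
    intro l
    rw [List.foldl_cons, ih, List.map_map]
    simp [Function.comp]

theorem zip_self_map {α β : Type} (l : List α) (g : α → β) :
    l.zip (l.map g) = l.map (fun x => (x, g x)) := by
  induction l with
  | nil => simp
  | cons a t ih => simp [ih]

-- A's alias-accumulation loop is the sum of the per-alias counts
theorem a_inner (low : String) (aliases : List String) (acc : Int) :
    aliases.foldl (fun n al => if al = "" then n else n + (PySem.Str.count low al : Int)) acc
      = acc + ((aliases.filter (fun a => a ≠ "")).map (fun a => (PySem.Str.count low a : Int))).sum := by
  induction aliases generalizing acc with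
  | nil => simp
  | cons a t ih =>
    by_cases ha : a = ""
    · subst ha
      rw [List.foldl_cons, if_pos rfl, ih]
      simp
    · rw [List.foldl_cons, if_neg ha, ih]
      simp [ha]
      ring

theorem toList_ne_nil (a : String) (ha : a ≠ "") : a.toList ≠ [] := by
  intro hn
  exact ha (by
    have := congrArg String.ofList hn
    simpa using this)

-- A's per-character total equals B's summed scanner counters
theorem inner_eq (low : String) (aliases : List String) :
    aliases.foldl (fun n al => if al = "" then n else n + (PySem.Str.count low al : Int)) 0
      = ((((aliases.filter (fun a => a ≠ "")).map (fun a => (a.toList, (0:Nat), (0:Nat)))).map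
          (fun st => (List.range low.toList.length).foldl (fun st i => bstep low.toList i st) st)).map
          (fun st => ((st.2.2 : Int)))).sum := by
  rw [a_inner low aliases 0, zero_add, List.map_map, List.map_map]
  congr 1
  apply List.map_congr_left
  intro a hmem
  have ha : a ≠ "" := by
    have := (List.mem_filter.mp hmem).2
    simpa using this
  have haL : a.toList ≠ [] := toList_ne_nil a ha
  have hs := scan_count low.toList a.toList haL low.toList.length 0 0 0 (by omega)
  simp only [Nat.max_self, List.drop_zero, Nat.zero_add] at hs
  have hs2 : (List.foldl (fun st i => bstep low.toList i st) (a.toList, 0, 0)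
      (List.range' 0 low.length)).2.2 = PySem.Chars.count low.toList a.toList := by
    simpa using hs
  simp [Function.comp, PySem.Str.count, List.range_eq_range', hs2]

-- ===== VERDICT (by name: the statement is the Claim_ definition above) =====
theorem count_character_mentions_spec : Claim_equal_count_character_mentions := by
  intro text char_index _hdom
  unfold Spec_count_character_mentions count_character_mentions count_character_mentions_alt
  simp only [foldl_map_comm, List.map_map, zip_self_map, List.foldl_map]
  congr 1
  apply List.foldl_ext
  intro d p _hp
  rw [inner_eq (PySem.Str.lower text) p.2]
  simp [Function.comp, List.map_map]
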